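-- pv_equiv track=rewrite | github.com/Abdul-nazeer/placement-app | apps/backend/app/services/resume_processing.py | _generate_format_recommendations
-- ===== SOURCE A (Python) =====
-- from typing import Dict, List, Optional, Any, Tuple
--
-- def _generate_format_recommendations(format_issues: List[str]) -> List[str]:
--     """Generate format recommendations."""
--     recommendations = []
--
--     for issue in format_issues:
--         if "email" in issue.lower():
--             recommendations.append("Add a professional email address in the contact section")
--         elif "phone" in issue.lower():
--             recommendations.append("Include a phone number for easy contact")
--         elif "experience" in issue.lower():
--             recommendations.append("Add work experience section with job titles, companies, and dates")
--         elif "education" in issue.lower():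
--             recommendations.append("Include education section with degree, institution, and graduation year")
--         elif "skills" in issue.lower():
--             recommendations.append("Add a skills section highlighting relevant technical and soft skills")
--
--     return recommendations
-- ===== SOURCE B (Python) =====
-- _TABLE = [
--     ("email", "Add a professional email address in the contact section"),
--     ("phone", "Include a phone number for easy contact"),
--     ("experience", "Add work experience section with job titles, companies, and dates"),
--     ("education", "Include education section with degree, institution, and graduation year"),
--     ("skills", "Add a skills section highlighting relevant technical and soft skills"),
-- ]
--
-- def _generate_format_recommendations(format_issues):
--     # Keyword-major staged passes: one sweep per keyword over a parallel
--     # slots array; an empty slot is filled the first time its issue matches,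
--     # so earlier keywords in _TABLE keep priority.  Finally drop empty slots.
--     lows = [issue.lower() for issue in format_issues]
--     slots = [None] * len(lows)
--     for kw, rec in _TABLE:
--         slots = [rec if s is None and kw in low else s
--                  for s, low in zip(slots, lows)]
--     return [s for s in slots if s is not None]
-- ===== Notes on version B (the rewrite author's own statement) =====
-- stated objective: alternative
-- what changed: Transposes the traversal: instead of one pass over issues with an if/elif chain, B makes one staged sweep per keyword over a parallel slots array, filling an issue's slot the first time a keyword matches (earlier keywords in the table keep priority), then filters out the empty slots.
import Mathlib
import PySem

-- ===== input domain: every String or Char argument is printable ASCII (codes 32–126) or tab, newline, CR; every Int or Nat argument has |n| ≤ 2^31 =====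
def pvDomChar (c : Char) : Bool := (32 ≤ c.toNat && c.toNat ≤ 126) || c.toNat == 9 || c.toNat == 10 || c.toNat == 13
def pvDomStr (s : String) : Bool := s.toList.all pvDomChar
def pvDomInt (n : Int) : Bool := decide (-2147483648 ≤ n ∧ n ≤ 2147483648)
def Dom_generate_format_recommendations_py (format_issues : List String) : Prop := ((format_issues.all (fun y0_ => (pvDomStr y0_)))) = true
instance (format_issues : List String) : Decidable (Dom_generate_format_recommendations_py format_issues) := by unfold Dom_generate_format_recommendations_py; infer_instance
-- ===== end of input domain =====

-- B transposes A's traversal (one staged sweep per keyword over a parallel slots array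
-- instead of one pass over issues with an if/elif chain); objective: alternative.

-- ===== PORT A =====
-- literal transliteration of A: accumulator loop with an if/elif chain per issue
def generate_format_recommendations_py (format_issues : List String) : List String :=
  format_issues.foldl (fun recommendations issue =>
    if PySem.Str.isIn "email" (PySem.Str.lower issue) then
      recommendations ++ ["Add a professional email address in the contact section"]
    else if PySem.Str.isIn "phone" (PySem.Str.lower issue) then
      recommendations ++ ["Include a phone number for easy contact"]
    else if PySem.Str.isIn "experience" (PySem.Str.lower issue) then
      recommendations ++ ["Add work experience section with job titles, companies, and dates"]
    else if PySem.Str.isIn "education" (PySem.Str.lower issue) then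
      recommendations ++ ["Include education section with degree, institution, and graduation year"]
    else if PySem.Str.isIn "skills" (PySem.Str.lower issue) then
      recommendations ++ ["Add a skills section highlighting relevant technical and soft skills"]
    else recommendations) []

-- ===== PORT B =====
-- B: keyword-major staged sweeps over a parallel slots array, then drop empty slots
def pvTable : List (String × String) :=
  [("email", "Add a professional email address in the contact section"),
   ("phone", "Include a phone number for easy contact"),
   ("experience", "Add work experience section with job titles, companies, and dates"),
   ("education", "Include education section with degree, institution, and graduation year"),
   ("skills", "Add a skills section highlighting relevant technical and soft skills")]

def generate_format_recommendations_py_alt (format_issues : List String) : List String :=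
  let lows := format_issues.map PySem.Str.lower
  let slots : List (Option String) := List.replicate lows.length none
  let slots := pvTable.foldl (fun slots kr =>
    List.zipWith (fun s low =>
      if s = none ∧ PySem.Str.isIn kr.1 low then some kr.2 else s) slots lows) slots
  slots.filterMap id

-- ===== PRECONDITION & SPEC =====
def Spec_generate_format_recommendations_py (format_issues : List String) (out : List String) : Prop := out = generate_format_recommendations_py_alt format_issues
instance (format_issues : List String) (out : List String) : Decidable (Spec_generate_format_recommendations_py format_issues out) := by unfold Spec_generate_format_recommendations_py; infer_instance

-- ===== CLAIM (what is proved, stated in full; the proofs are below) =====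
def Claim_equal_generate_format_recommendations_py : Prop := ∀ (format_issues : List String), Dom_generate_format_recommendations_py format_issues → Spec_generate_format_recommendations_py format_issues (generate_format_recommendations_py format_issues)

-- ===== LEMMAS AND PROOFS =====

-- per-issue first matching recommendation of the table (proof-only helper)
def pvFirst (low : String) : Option String :=
  pvTable.foldl (fun s kr =>
    if s = none ∧ PySem.Str.isIn kr.1 low then some kr.2 else s) none

-- zipWith of a mapped list with the list itself is a pointwise map
lemma pv_zip_map_same {α β : Type} (g : β → α → β) (f : α → β) (l : List α) :
    List.zipWith g (l.map f) l = l.map (fun x => g (f x) x) := by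
  induction l with
  | nil => rfl
  | cons x t ih => simp [ih]

-- a replicate of nones is a constant map
lemma pv_replicate_none {α : Type} (l : List α) :
    List.replicate l.length (none : Option String) = l.map (fun _ => none) := by
  induction l with
  | nil => rfl
  | cons x t ih => rw [List.map_cons, ← ih]; rfl

-- the keyword-major fold over a mapped slots list acts pointwise
lemma pv_commute (tab : List (String × String)) (lows : List String)
    (f : String → Option String) :
    tab.foldl (fun slots kr =>
      List.zipWith (fun s low =>
        if s = none ∧ PySem.Str.isIn kr.1 low then some kr.2 else s) slots lows)
      (lows.map f)
    = lows.map (fun low => tab.foldl (fun s kr =>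
        if s = none ∧ PySem.Str.isIn kr.1 low then some kr.2 else s) (f low)) := by
  induction tab generalizing f with
  | nil => simp
  | cons kr t ih =>
    simp only [List.foldl_cons]
    rw [pv_zip_map_same (fun s low =>
      if s = none ∧ PySem.Str.isIn kr.1 low then some kr.2 else s) f lows]
    exact ih _

lemma pv_alt_eq (xs : List String) :
    generate_format_recommendations_py_alt xs
    = (xs.map (fun issue => pvFirst (PySem.Str.lower issue))).filterMap id := by
  show (pvTable.foldl (fun slots kr =>
      List.zipWith (fun s low =>
        if s = none ∧ PySem.Str.isIn kr.1 low then some kr.2 else s) slots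
        (xs.map PySem.Str.lower))
      (List.replicate (xs.map PySem.Str.lower).length none)).filterMap id = _
  rw [pv_replicate_none, pv_commute]
  simp only [List.map_map]
  rfl

lemma pvFirst_eq (low : String) :
    pvFirst low =
      if PySem.Str.isIn "email" low then
        some "Add a professional email address in the contact section"
      else if PySem.Str.isIn "phone" low then
        some "Include a phone number for easy contact"
      else if PySem.Str.isIn "experience" low then
        some "Add work experience section with job titles, companies, and dates"
      else if PySem.Str.isIn "education" low then
        some "Include education section with degree, institution, and graduation year"
      else if PySem.Str.isIn "skills" low then
        some "Add a skills section highlighting relevant technical and soft skills"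
      else none := by
  unfold pvFirst pvTable
  simp only [List.foldl_cons, List.foldl_nil]
  by_cases h1 : PySem.Str.isIn "email" low
  · simp_all
  by_cases h2 : PySem.Str.isIn "phone" low
  · simp_all
  by_cases h3 : PySem.Str.isIn "experience" low
  · simp_all
  by_cases h4 : PySem.Str.isIn "education" low
  · simp_all
  by_cases h5 : PySem.Str.isIn "skills" low
  · simp_all
  simp_all

lemma pv_foldl_eq (xs : List String) (acc : List String) :
    xs.foldl (fun recommendations issue =>
      if PySem.Str.isIn "email" (PySem.Str.lower issue) then
        recommendations ++ ["Add a professional email address in the contact section"]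
      else if PySem.Str.isIn "phone" (PySem.Str.lower issue) then
        recommendations ++ ["Include a phone number for easy contact"]
      else if PySem.Str.isIn "experience" (PySem.Str.lower issue) then
        recommendations ++ ["Add work experience section with job titles, companies, and dates"]
      else if PySem.Str.isIn "education" (PySem.Str.lower issue) then
        recommendations ++ ["Include education section with degree, institution, and graduation year"]
      else if PySem.Str.isIn "skills" (PySem.Str.lower issue) then
        recommendations ++ ["Add a skills section highlighting relevant technical and soft skills"]
      else recommendations) acc
    = acc ++ (xs.map (fun issue => pvFirst (PySem.Str.lower issue))).filterMap id := by
  induction xs generalizing acc with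
  | nil => simp
  | cons x t ih =>
    simp only [List.foldl_cons, ih, List.map_cons, List.filterMap_cons, pvFirst_eq]
    split_ifs <;> simp

-- ===== VERDICT (by name: the statement is the Claim_ definition above) =====
set_option maxHeartbeats 1000000 in
theorem generate_format_recommendations_py_spec : Claim_equal_generate_format_recommendations_py := by
  intro xs _
  unfold Spec_generate_format_recommendations_py generate_format_recommendations_py
  rw [pv_alt_eq]
  simpa using pv_foldl_eq xs []
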